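-- pv_equiv track=rewrite | github.com/olifirovai/algorithm_course | Sprint 13. Final Tasks/A. Photos - Classic Greed.py | data_center
-- ===== SOURCE A (Python) =====
-- def data_center(n, capacity_list, max_photos):
--     if n < 2:
--         return 0
--
--     while len(capacity_list) > 1:
--         capacity_list.sort()
--         max_number = capacity_list[-1]
--         min_number = capacity_list[0]
--         capacity_list[-1] = max_number - 1
--         capacity_list[0] = min_number - 1
--
--         if capacity_list[0] == 0:
--             capacity_list.pop(0)
--         if capacity_list[-1] == 0:
--             capacity_list.pop(-1)
--
--     if len(capacity_list) == 1:
--         max_photos = (max_photos - capacity_list[0]) // 2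
--         return max_photos
--
--     return (max_photos // 2)
-- ===== SOURCE B (Python) =====
-- def data_center(n, capacity_list, max_photos):
--     # Closed form: repeatedly decrementing the max and the min by 1 leaves
--     # 2*m - s photos on one server when the max m exceeds the rest (s = total),
--     # otherwise everything pairs off down to s % 2.
--     if n < 2:
--         return 0
--     if len(capacity_list) == 0:
--         return max_photos // 2
--     s = sum(capacity_list)
--     m = max(capacity_list)
--     if len(capacity_list) == 1:
--         r = m
--     elif 2 * m > s:
--         r = 2 * m - s
--     else:
--         r = s % 2
--     if r == 0:
--         return max_photos // 2
--     return (max_photos - r) // 2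
-- ===== Notes on version B (the rewrite author's own statement) =====
-- stated objective: alternative
-- what changed: Replaces the sort-decrement-pop simulation loop with a single-pass closed form: the leftover after repeatedly decrementing max and min is 2*max-sum if 2*max>sum, else sum%2.
-- intended difference: On inputs with n >= 2, at least two servers and exactly one capacity <= 0 (a meaningless input for the task), A's loop drags that pile ever further below zero and returns (max_photos - leftover)//2 for whatever negative leftover the simulation happens to end with (4 at the witness (2,[0,2],7)), while B returns the closed-form answer for the given sum and max (2 there), the natural reading of this unspecified corner. — e.g. on data_center(2, [0, 2], 7): A returns 4, B returns 2
import Mathlib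
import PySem

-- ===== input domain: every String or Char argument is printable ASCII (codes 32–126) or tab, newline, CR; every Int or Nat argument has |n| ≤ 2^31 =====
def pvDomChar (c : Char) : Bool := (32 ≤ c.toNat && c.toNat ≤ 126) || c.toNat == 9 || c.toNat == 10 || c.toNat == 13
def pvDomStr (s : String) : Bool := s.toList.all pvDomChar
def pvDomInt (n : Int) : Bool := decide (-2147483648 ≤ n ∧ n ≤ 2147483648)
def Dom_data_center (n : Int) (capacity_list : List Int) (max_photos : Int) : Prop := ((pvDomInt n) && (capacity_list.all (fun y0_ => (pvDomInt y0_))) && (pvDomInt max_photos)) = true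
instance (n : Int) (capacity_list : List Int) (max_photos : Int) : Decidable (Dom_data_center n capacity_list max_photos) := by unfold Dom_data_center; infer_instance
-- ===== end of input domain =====

-- B replaces A's sort/decrement/pop simulation loop by a single-pass closed form on the sum
-- and the max of the list (objective: alternative). A sorts and mutates capacity_list in
-- place; the equivalence proved here is about the RETURN value only.

-- ===== PORT A =====
-- One body of A's while loop. The list has length ≥ 2 whenever the body runs, so the in-place
-- writes and pops are encoded exactly: s[-1] = v is dropLast ++ [v], s[0] = v is v :: tail,
-- pop(0) is tail, pop(-1) is dropLast.
def dcBody (l : List Int) : List Int :=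
  let s := PySem.List.sorted l (fun x => x) false      -- capacity_list.sort()
  let mx := PySem.List.pyGetD s (-1) 0                 -- max_number = capacity_list[-1]
  let mn := PySem.List.pyGetD s 0 0                    -- min_number = capacity_list[0]
  let s1 := s.dropLast ++ [mx - 1]                     -- capacity_list[-1] = max_number - 1
  let s2 := (mn - 1) :: s1.tail                        -- capacity_list[0] = min_number - 1
  let s3 := if PySem.List.pyGetD s2 0 1 = 0 then s2.tail else s2       -- if [0] == 0: pop(0)
  if PySem.List.pyGetD s3 (-1) 1 = 0 then s3.dropLast else s3          -- if [-1] == 0: pop(-1)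

-- A's while loop, made total with fuel (A diverges outside Pre_; inside Pre_ the fuel below
-- is sufficient, since every iteration lowers the sum by 2).
def dcLoop : Nat → List Int → List Int
  | 0, l => l
  | fuel+1, l => if 1 < l.length then dcLoop fuel (dcBody l) else l

def data_center (n : Int) (capacity_list : List Int) (max_photos : Int) : Int :=
  if n < 2 then 0
  else
    let final := dcLoop ((capacity_list.map Int.natAbs).sum + 1) capacity_list
    if final.length = 1 then PySem.Int.floordiv (max_photos - PySem.List.pyGetD final 0 0) 2
    else PySem.Int.floordiv max_photos 2

-- ===== PORT B =====
def data_center_alt (n : Int) (capacity_list : List Int) (max_photos : Int) : Int :=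
  if n < 2 then 0
  else if capacity_list.length = 0 then PySem.Int.floordiv max_photos 2
  else
    let s := capacity_list.sum
    let m := (PySem.List.max? capacity_list (fun x => x)).getD 0
    let r := if capacity_list.length = 1 then m
             else if s < 2 * m then 2 * m - s
             else PySem.Int.mod s 2
    if r = 0 then PySem.Int.floordiv max_photos 2
    else PySem.Int.floordiv (max_photos - r) 2

-- ===== PRECONDITION & SPEC =====
-- Pre_ excludes exactly the inputs on which A never returns: with n ≥ 2 and at least two
-- servers, two or more capacities ≤ 0 make A's while loop run forever (both ends of the
-- sorted list go negative, are never popped, and the length never drops below 2).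
def Pre_data_center (n : Int) (capacity_list : List Int) (max_photos : Int) : Prop :=
  n < 2 ∨ capacity_list.length ≤ 1 ∨ capacity_list.countP (fun x => decide (x ≤ 0)) ≤ 1
instance (n : Int) (capacity_list : List Int) (max_photos : Int) : Decidable (Pre_data_center n capacity_list max_photos) := by unfold Pre_data_center; infer_instance

def pvWitness_data_center : Int × List Int × Int := (3, [2, 3, 4], 10)

-- On inputs with n ≥ 2, at least two servers and exactly one capacity ≤ 0 (a meaningless
-- input for the task), A's loop drags that pile ever further below zero and returns
-- (max_photos - leftover) // 2 for whatever negative leftover the simulation happens to end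
-- with (4 at the witness); B returns the closed-form answer for the given sum and max
-- (2 there), the natural reading of this unspecified corner.
def D_data_center (n : Int) (capacity_list : List Int) (max_photos : Int) : Prop :=
  ¬ n < 2 ∧ 2 ≤ capacity_list.length ∧ capacity_list.countP (fun x => decide (x ≤ 0)) = 1
instance (n : Int) (capacity_list : List Int) (max_photos : Int) : Decidable (D_data_center n capacity_list max_photos) := by unfold D_data_center; infer_instance

def Spec_data_center (n : Int) (capacity_list : List Int) (max_photos : Int) (out : Int) : Prop := ¬ D_data_center n capacity_list max_photos → out = data_center_alt n capacity_list max_photos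
instance (n : Int) (capacity_list : List Int) (max_photos : Int) (out : Int) : Decidable (Spec_data_center n capacity_list max_photos out) := by unfold Spec_data_center; infer_instance

def pvDiffWitness_data_center : Int × List Int × Int := (2, [0, 2], 7)
def pvDiffWitnessOut_data_center : Int × Int := (4, 2)

-- ===== CLAIM (what is proved, stated in full; the proofs are below) =====
def Claim_unchanged_data_center : Prop := ∀ (n : Int) (capacity_list : List Int) (max_photos : Int), Dom_data_center n capacity_list max_photos → Pre_data_center n capacity_list max_photos → Spec_data_center n capacity_list max_photos (data_center n capacity_list max_photos)
def Claim_changed_data_center : Prop := Dom_data_center (pvDiffWitness_data_center.1) (pvDiffWitness_data_center.2.1) (pvDiffWitness_data_center.2.2) ∧ Pre_data_center (pvDiffWitness_data_center.1) (pvDiffWitness_data_center.2.1) (pvDiffWitness_data_center.2.2) ∧ D_data_center (pvDiffWitness_data_center.1) (pvDiffWitness_data_center.2.1) (pvDiffWitness_data_center.2.2) ∧ data_center (pvDiffWitness_data_center.1) (pvDiffWitness_data_center.2.1) (pvDiffWitness_data_center.2.2) = pvDiffWitnessOut_data_center.1 ∧ data_center_alt (pvDiffWitness_data_center.1) (pvDiffWitness_data_center.2.1)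 (pvDiffWitness_data_center.2.2) = pvDiffWitnessOut_data_center.2 ∧ pvDiffWitnessOut_data_center.1 ≠ pvDiffWitnessOut_data_center.2

-- ===== LEMMAS AND PROOFS =====

-- closed-form result of A's loop on a list with sum S and maximum M (all elements ≥ 1)
def tgt (S M : Int) : List Int := if S < 2 * M then [2 * M - S] else if S % 2 = 0 then [] else [1]

-- max(l) of a nonempty list, as port B computes it
def maxL (l : List Int) : Int := (PySem.List.max? l (fun x => x)).getD 0

lemma length_le_sum (l : List Int) (h : ∀ x ∈ l, 1 ≤ x) : (l.length : Int) ≤ l.sum := by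
  induction l with
  | nil => simp
  | cons a t ih =>
    have := h a (by simp)
    have := ih (fun x hx => h x (by simp [hx]))
    simp only [List.length_cons, List.sum_cons]
    push_cast
    omega

lemma sum_le_natAbs_sum (l : List Int) : l.sum ≤ ((l.map Int.natAbs).sum : Int) := by
  induction l with
  | nil => simp
  | cons a t ih =>
    simp only [List.map_cons, List.sum_cons, Nat.cast_add]
    omega

lemma maxL_eq (l : List Int) (b : Int) (hb : b ∈ l) (hub : ∀ x ∈ l, x ≤ b) : maxL l = b := by
  have hne : l ≠ [] := by intro h; subst h; simp at hb
  obtain ⟨m, hm⟩ : ∃ m, PySem.List.max? l (fun x => x) = some m := by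
    cases h : PySem.List.max? l (fun x => x) with
    | none => exact absurd ((PySem.List.max?_eq_none_iff l _).mp h) hne
    | some m => exact ⟨m, rfl⟩
  have hmem := PySem.List.max?_mem hm
  have hmax := PySem.List.max?_isMax hm
  have h1 : m ≤ b := hub m hmem
  have h2 : b ≤ m := hmax b hb
  simp [maxL, hm]; omega

lemma decomp2 (l : List Int) (h : 2 ≤ l.length) : ∃ a u b, l = a :: u ++ [b] := by
  match l, h with
  | a :: t, h =>
    have ht : t ≠ [] := by intro he; subst he; simp at h
    exact ⟨a, t.dropLast, t.getLast ht, by simp [List.dropLast_append_getLast ht]⟩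

lemma dcBody_eq (l : List Int) (a b : Int) (u : List Int)
    (hs : PySem.List.sorted l (fun x => x) false = a :: u ++ [b]) :
    dcBody l = (if a = 1 then [] else [a - 1]) ++ u ++ (if b = 1 then [] else [b - 1]) := by
  have e_get : PySem.List.pyGetD (a :: u ++ [b]) (-1) 0 = b := by
    simpa using PySem.List.pyGetD_neg_one_append_singleton (a :: u) b 0
  have e_drop : (a :: u ++ [b]).dropLast = a :: u := by
    simpa using (List.dropLast_concat (l₁ := a :: u) (b := b))
  have g1 : PySem.List.pyGetD (u ++ [b - 1]) (-1) 1 = b - 1 :=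
    PySem.List.pyGetD_neg_one_append_singleton u (b - 1) 1
  have g2 : PySem.List.pyGetD ((a - 1) :: (u ++ [b - 1])) (-1) 1 = b - 1 := by
    simpa using PySem.List.pyGetD_neg_one_append_singleton ((a - 1) :: u) (b - 1) 1
  have d1 : (u ++ [b - 1]).dropLast = u := List.dropLast_concat
  have d2 : ((a - 1) :: (u ++ [b - 1])).dropLast = (a - 1) :: u := by
    simpa using (List.dropLast_concat (l₁ := (a - 1) :: u) (b := b - 1))
  unfold dcBody
  rw [hs]
  simp only []
  rw [e_get, e_drop]
  simp only [List.cons_append, List.tail_cons, PySem.List.pyGetD_zero_cons]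
  by_cases hA : a - 1 = 0
  · rw [if_pos hA, g1]
    by_cases hB : b - 1 = 0
    · rw [if_pos hB, d1, if_pos (by omega : a = 1), if_pos (by omega : b = 1)]; simp
    · rw [if_neg hB, if_pos (by omega : a = 1), if_neg (by omega : ¬ b = 1)]; simp
  · rw [if_neg hA, g2]
    by_cases hB : b - 1 = 0
    · rw [if_pos hB, d2, if_neg (by omega : ¬ a = 1), if_pos (by omega : b = 1)]; simp
    · rw [if_neg hB, if_neg (by omega : ¬ a = 1), if_neg (by omega : ¬ b = 1)]; simp

lemma dcLoop_short (fuel : Nat) (l : List Int) (h : l.length ≤ 1) : dcLoop fuel l = l := by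
  cases fuel with
  | zero => rfl
  | succ f => rw [dcLoop, if_neg (by omega)]

lemma dcLoop_eq (fuel : Nat) : ∀ l : List Int, 2 ≤ l.length → (∀ x ∈ l, 1 ≤ x) →
    l.sum ≤ (fuel : Int) → dcLoop fuel l = tgt l.sum (maxL l) := by
  induction fuel with
  | zero =>
    intro l hlen hpos hsum
    exfalso
    have h1 := length_le_sum l hpos
    have h2 : (2:Int) ≤ (l.length : Int) := by exact_mod_cast hlen
    push_cast at hsum
    omega
  | succ f ih =>
    intro l hlen hpos hsum
    have hslen : 2 ≤ (PySem.List.sorted l (fun x => x) false).length := by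
      rw [PySem.List.length_sorted]; exact hlen
    obtain ⟨a, u, b, hs⟩ := decomp2 _ hslen
    have hperm : (a :: u ++ [b]).Perm l := by rw [← hs]; exact PySem.List.sorted_perm l _ false
    have hsum_eq : a + (u.sum + b) = l.sum := by
      have := hperm.sum_eq; simpa using this
    have hmemiff : ∀ x : Int, x ∈ a :: u ++ [b] ↔ x ∈ l := fun x => hperm.mem_iff
    have ha1 : 1 ≤ a := hpos a ((hmemiff a).mp (by simp))
    have hb1 : 1 ≤ b := hpos b ((hmemiff b).mp (by simp))
    have hu1 : ∀ x ∈ u, 1 ≤ x := fun x hx => hpos x ((hmemiff x).mp (by simp [hx]))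
    have husum : 0 ≤ u.sum := by
      have h1 := length_le_sum u hu1
      have h2 : (0:Int) ≤ (u.length : Int) := Int.natCast_nonneg _
      omega
    have hpair := PySem.List.sorted_pairwise l (fun x => x)
    rw [hs] at hpair
    obtain ⟨hafirst, hpair2⟩ := List.pairwise_cons.mp hpair
    obtain ⟨-, -, hub'⟩ := List.pairwise_append.mp hpair2
    have hab : a ≤ b := hafirst b (by simp)
    have hub : ∀ x ∈ u, x ≤ b := fun x hx => hub' x hx b (by simp)
    have hlb : ∀ x ∈ l, x ≤ b := by
      intro x hx
      rcases List.mem_cons.mp ((hmemiff x).mpr hx) with rfl | h2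
      · exact hab
      · rcases List.mem_append.mp h2 with h3 | h3
        · exact hub x h3
        · simp at h3; omega
    have hmaxl : maxL l = b := maxL_eq l b ((hmemiff b).mp (by simp)) hlb
    have hbody := dcBody_eq l a b u hs
    obtain ⟨L2, hL2⟩ : ∃ L2 : List Int,
        (if a = 1 then ([]:List Int) else [a - 1]) ++ u ++ (if b = 1 then ([]:List Int) else [b - 1]) = L2 :=
      ⟨_, rfl⟩
    rw [hL2] at hbody
    have hstep : dcLoop (f+1) l = dcLoop f L2 := by
      rw [dcLoop, if_pos (by omega : 1 < l.length), hbody]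
    have hsum2 : L2.sum = l.sum - 2 := by
      rw [← hL2]; split_ifs <;> simp [List.sum_append] <;> omega
    have hmem2 : ∀ x ∈ L2, x = a - 1 ∨ x ∈ u ∨ x = b - 1 := by
      intro x hx
      rw [← hL2] at hx
      rcases List.mem_append.mp hx with h | h
      · rcases List.mem_append.mp h with h' | h'
        · left; split_ifs at h' <;> simp at h' <;> omega
        · right; left; exact h'
      · right; right; split_ifs at h <;> simp at h <;> omega
    have hpos2 : ∀ x ∈ L2, 1 ≤ x := by
      intro x hx
      rw [← hL2] at hx
      rcases List.mem_append.mp hx with h | h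
      · rcases List.mem_append.mp h with h' | h'
        · split_ifs at h' with h1 <;> simp at h' <;> omega
        · exact hu1 x h'
      · split_ifs at h with h1 <;> simp at h <;> omega
    rw [hstep, hmaxl]
    by_cases hlong : 2 ≤ L2.length
    · have hsumf : L2.sum ≤ (f : Int) := by rw [hsum2]; push_cast at hsum; omega
      rw [ih L2 hlong hpos2 hsumf, hsum2]
      obtain ⟨m2, hm2⟩ : ∃ m, PySem.List.max? L2 (fun x => x) = some m := by
        cases h : PySem.List.max? L2 (fun x => x) with
        | none =>
          exfalso
          have := (PySem.List.max?_eq_none_iff L2 _).mp h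
          rw [this] at hlong; simp at hlong
        | some m => exact ⟨m, rfl⟩
      have hm2mem : m2 ∈ L2 := PySem.List.max?_mem hm2
      have hm2max : ∀ y ∈ L2, y ≤ m2 := by
        have := PySem.List.max?_isMax hm2; simpa using this
      have hmax2 : maxL L2 = m2 := by simp [maxL, hm2]
      rw [hmax2]
      by_cases hcase : l.sum < 2 * b
      · have hbne : b ≠ 1 := by omega
        have hbm : b - 1 ∈ L2 := by rw [← hL2]; simp [hbne]
        have hball : ∀ x ∈ L2, x ≤ b - 1 := by
          intro x hx
          rcases hmem2 x hx with rfl | h | rfl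
          · omega
          · have hxle : x ≤ u.sum := List.single_le_sum (fun y hy => by have := hu1 y hy; omega) x h
            omega
          · omega
        have hm2v : m2 = b - 1 := le_antisymm (hball m2 hm2mem) (hm2max (b-1) hbm)
        rw [hm2v, tgt, tgt, if_pos (by omega), if_pos hcase]
        congr 1; ring
      · have hm2b : m2 ≤ b := by
          rcases hmem2 m2 hm2mem with h' | h' | h'
          · omega
          · have := hub m2 h'; omega
          · omega
        by_cases hcross : l.sum - 2 < 2 * m2
        · have hne : 2 * m2 ≠ l.sum := by
            intro he
            have hm2eqb : m2 = b := by omega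
            rcases hmem2 m2 hm2mem with h' | h' | h'
            · omega
            · have hin : b ∈ u := by rw [← hm2eqb]; exact h'
              have : b ≤ u.sum := List.single_le_sum (fun y hy => by have := hu1 y hy; omega) b hin
              omega
            · omega
          have hodd : 2 * m2 = l.sum - 1 := by omega
          rw [tgt, tgt, if_pos hcross, if_neg (by omega : ¬ l.sum < 2 * b),
            if_neg (by omega : ¬ l.sum % 2 = 0)]
          congr 1; omega
        · rw [tgt, tgt, if_neg hcross, if_neg (by omega : ¬ l.sum < 2 * b)]
          have hpar : (l.sum - 2) % 2 = l.sum % 2 := by omega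
          rw [hpar]
    · rw [dcLoop_short f L2 (by omega)]
      by_cases hA : a = 1
      · by_cases hB : b = 1
        · have hEu : L2 = u := by rw [← hL2]; simp [hA, hB]
          cases u with
          | nil =>
            have hsum3 : l.sum = 2 := by simp at hsum_eq; omega
            rw [hEu, tgt, if_neg (by omega : ¬ l.sum < 2 * b), if_pos (by omega : l.sum % 2 = 0)]
          | cons c u' =>
            have hc1 : c = 1 := by
              have h1 := hu1 c (by simp)
              have h2 := hub c (by simp)
              omega
            have hu' : u' = [] := by
              rw [hEu] at hlong
              cases u' with
              | nil => rfl
              | cons d u'' => exfalso; simp at hlong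
            subst hu'
            have hsum3 : l.sum = 3 := by
              simp at hsum_eq; omega
            rw [hEu, tgt, if_neg (by omega : ¬ l.sum < 2 * b),
              if_neg (by omega : ¬ l.sum % 2 = 0), hc1]
        · have hu0 : u = [] := by
            cases u with
            | nil => rfl
            | cons c u' => exfalso; rw [← hL2] at hlong; simp [hA, hB] at hlong
          subst hu0
          have hL2v : L2 = [b - 1] := by rw [← hL2]; simp [hA, hB]
          rw [hL2v, tgt, if_pos (by simp at hsum_eq; omega : l.sum < 2 * b)]
          congr 1
          simp at hsum_eq; omega
      · exfalso
        have hbne : b ≠ 1 := by omega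
        rw [← hL2] at hlong
        simp [hA, hbne] at hlong

-- ===== VERDICT (by name: the statement is the Claim_ definition above) =====
theorem data_center_spec : Claim_unchanged_data_center := by
  unfold Claim_unchanged_data_center
  intro n cl mp _ hpre
  unfold Spec_data_center
  intro hnd
  unfold data_center data_center_alt
  by_cases hn : n < 2
  · rw [if_pos hn, if_pos hn]
  · rw [if_neg hn, if_neg hn]
    simp only []
    cases cl with
    | nil =>
      rw [dcLoop_short _ _ (by simp)]
      simp
    | cons x t =>
      cases t with
      | nil =>
        rw [dcLoop_short _ _ (by simp)]
        have hm : PySem.List.max? [x] (fun y => y) = some x := by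
          simpa using PySem.List.max?_id_cons (x := x) (t := ([] : List Int))
        by_cases hx : x = 0
        · subst hx; simp [hm, PySem.List.pyGetD_zero_cons]
        · simp [hm, hx, PySem.List.pyGetD_zero_cons]
      | cons y t' =>
        have hpos : ∀ z ∈ x :: y :: t', 1 ≤ z := by
          have hc1 : (x :: y :: t').countP (fun z => decide (z ≤ 0)) ≤ 1 := by
            rcases hpre with h | h | h
            · omega
            · simp at h
            · exact h
          have hc0 : (x :: y :: t').countP (fun z => decide (z ≤ 0)) = 0 := by
            unfold D_data_center at hnd
            have : ¬ ((x :: y :: t').countP (fun z => decide (z ≤ 0)) = 1) :=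
              fun h => hnd ⟨hn, by simp only [List.length_cons]; omega, h⟩
            omega
          intro z hz
          have := List.countP_eq_zero.mp hc0 z hz
          simp at this
          omega
        have hfuel : (x :: y :: t').sum ≤ ((((x :: y :: t').map Int.natAbs).sum + 1 : Nat) : Int) := by
          have := sum_le_natAbs_sum (x :: y :: t')
          omega
        rw [dcLoop_eq _ _ (by simp) hpos hfuel]
        have hmm : (PySem.List.max? (x :: y :: t') (fun z => z)).getD 0 = maxL (x :: y :: t') := rfl
        rw [hmm]
        have hS1 : 0 < (x :: y :: t').sum := by
          have h1 := length_le_sum _ hpos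
          have h2 : (2:Int) ≤ ((x :: y :: t').length : Int) := by simp; omega
          omega
        by_cases h1 : (x :: y :: t').sum < 2 * maxL (x :: y :: t')
        · rw [tgt, if_pos h1]
          have hr0 : ¬ (2 * maxL (x :: y :: t') - (x :: y :: t').sum = 0) := by omega
          rw [if_pos (show ([2 * maxL (x :: y :: t') - (x :: y :: t').sum] : List Int).length = 1 from rfl),
            PySem.List.pyGetD_zero_cons,
            if_neg (show ¬ ((x :: y :: t').length = 0) by simp),
            if_neg (show ¬ ((x :: y :: t').length = 1) by simp),
            if_pos h1, if_neg hr0]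
        · rw [tgt, if_neg h1]
          have hmod : PySem.Int.mod (x :: y :: t').sum 2 = (x :: y :: t').sum % 2 :=
            PySem.Int.mod_eq_emod_of_pos (by norm_num)
          rw [if_neg (show ¬ ((x :: y :: t').length = 0) by simp),
            if_neg (show ¬ ((x :: y :: t').length = 1) by simp),
            if_neg h1, hmod]
          by_cases h2 : (x :: y :: t').sum % 2 = 0
          · rw [if_pos h2, if_neg (show ¬ (([]:List Int).length = 1) by simp), if_pos h2]
          · rw [if_neg h2, if_pos (show ([1]:List Int).length = 1 from rfl),
              PySem.List.pyGetD_zero_cons]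
            have h3 : (x :: y :: t').sum % 2 = 1 := by omega
            rw [h3, if_neg (show ¬ ((1:Int) = 0) by norm_num)]

theorem data_center_changed : Claim_changed_data_center := by
  unfold Claim_changed_data_center
  decide
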